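-- pv_equiv track=rewrite | github.com/Bujhc/eplan_db | db_excel.py | request_db
-- ===== SOURCE A (Python) =====
-- def request_db(product_db, price):
--
--     finish_price= []
--
--     for i in price:                                # prepare list with price for SQL request/update
--         for y in product_db:
--                 if i[0] == y[0]:
--                     index = price.index(i)
--                     finish_price.append(price[index])
--
--     return finish_price
-- ===== SOURCE B (Python) =====
-- def request_db(product_db, price):
--     # one pass over product_db to count rows per key, one pass over price
--     counts = {}
--     for y in product_db:
--         counts[y[0]] = counts.get(y[0], 0) + 1
--     finish_price = []
--     for i in price:
--         finish_price += [i] * counts.get(i[0], 0)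
--     return finish_price
-- ===== Notes on version B (the rewrite author's own statement) =====
-- stated objective: faster
-- what changed: Replaces the nested scan over product_db plus a repeated price.index scan per match with a dictionary of key counts built in one pass, then a single pass over price emitting each row repeated by its key's count.
-- outside the precondition, e.g. on request_db([[]], []): A returns [], B raises IndexError; on request_db([], [[]]): A returns [], B raises IndexError
import Mathlib
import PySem

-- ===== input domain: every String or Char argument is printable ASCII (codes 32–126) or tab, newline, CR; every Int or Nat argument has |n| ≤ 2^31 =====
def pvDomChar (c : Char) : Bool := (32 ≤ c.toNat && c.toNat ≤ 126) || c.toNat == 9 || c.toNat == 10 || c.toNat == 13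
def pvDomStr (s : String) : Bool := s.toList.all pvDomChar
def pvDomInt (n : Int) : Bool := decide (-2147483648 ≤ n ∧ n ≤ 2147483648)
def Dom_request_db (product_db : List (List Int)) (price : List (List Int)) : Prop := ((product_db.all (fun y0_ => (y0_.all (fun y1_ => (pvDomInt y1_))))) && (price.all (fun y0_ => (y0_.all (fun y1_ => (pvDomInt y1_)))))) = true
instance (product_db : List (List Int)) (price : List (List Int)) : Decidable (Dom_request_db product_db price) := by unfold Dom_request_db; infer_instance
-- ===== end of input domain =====

-- B replaces A's nested scans (plus a price.index scan per match) with a one-pass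
-- dictionary of key counts and a single pass over price: asymptotically faster.

-- ===== PORT A =====
-- i[0] / y[0] ported with pyGet? (.getD is dead code under Pre_, where rows are nonempty);
-- price.index(i) → PySem.List.index? (always some, since i ∈ price); price[index] → pyGet?.
def request_db (product_db : List (List Int)) (price : List (List Int)) : List (List Int) :=
  price.foldl (fun finish_price i =>
    product_db.foldl (fun fp y =>
      if (PySem.List.pyGet? i 0).getD 0 = (PySem.List.pyGet? y 0).getD 0 then
        match PySem.List.index? price i with
        | some index => fp ++ [(PySem.List.pyGet? price (index : Int)).getD []]
        | none => fp
      else fp) finish_price) []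

-- ===== PORT B =====
def request_db_alt (product_db : List (List Int)) (price : List (List Int)) : List (List Int) :=
  let counts : PySem.Dict Int Int :=
    product_db.foldl (fun d y =>
      d.insert ((PySem.List.pyGet? y 0).getD 0) (d.getD ((PySem.List.pyGet? y 0).getD 0) 0 + 1))
      PySem.Dict.empty
  price.foldl (fun finish_price i =>
    finish_price ++ PySem.List.pyRepeat [i] (counts.getD ((PySem.List.pyGet? i 0).getD 0) 0)) []

-- ===== PRECONDITION & SPEC =====
-- Pre_ excludes inputs with an empty row in either list: there A raises IndexError on i[0]/y[0]
-- except in the degenerate cases where the other list is empty and A accidentally returns []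
-- (B validates every row's key and raises there).
def Pre_request_db (product_db : List (List Int)) (price : List (List Int)) : Prop :=
  (∀ y ∈ product_db, y ≠ []) ∧ (∀ i ∈ price, i ≠ [])
instance (product_db : List (List Int)) (price : List (List Int)) : Decidable (Pre_request_db product_db price) := by unfold Pre_request_db; infer_instance
def pvWitness_request_db : List (List Int) × List (List Int) := ([[1, 10], [2, 20]], [[1, 5], [3, 7], [1, 5]])

def Spec_request_db (product_db : List (List Int)) (price : List (List Int)) (out : List (List Int)) : Prop := out = request_db_alt product_db price
instance (product_db : List (List Int)) (price : List (List Int)) (out : List (List Int)) : Decidable (Spec_request_db product_db price out) := by unfold Spec_request_db; infer_instance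

-- ===== CLAIM (what is proved, stated in full; the proofs are below) =====
def Claim_equal_request_db : Prop := ∀ (product_db : List (List Int)) (price : List (List Int)), Dom_request_db product_db price → Pre_request_db product_db price → Spec_request_db product_db price (request_db product_db price)

-- ===== LEMMAS AND PROOFS =====

-- the key of a row, as both ports compute it
def pvKey (x : List Int) : Int := (PySem.List.pyGet? x 0).getD 0

-- A's inner loop over product_db appends one copy of i (the first occurrence of i in price,
-- which equals i) per product row whose key matches.
lemma pv_inner (product_db price : List (List Int)) (i : List Int) (hi : i ∈ price)
    (fp : List (List Int)) :
    product_db.foldl (fun fp y =>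
      if (PySem.List.pyGet? i 0).getD 0 = (PySem.List.pyGet? y 0).getD 0 then
        match PySem.List.index? price i with
        | some index => fp ++ [(PySem.List.pyGet? price (index : Int)).getD []]
        | none => fp
      else fp) fp
    = fp ++ List.replicate (product_db.countP (fun y => pvKey y == pvKey i)) i := by
  obtain ⟨k, hk⟩ : ∃ k, PySem.List.index? price i = some k := by
    rcases Option.isSome_iff_exists.mp ((PySem.List.index?_isSome_iff _ _).mpr hi) with ⟨k, hk⟩
    exact ⟨k, hk⟩
  obtain ⟨hlt, hget, -⟩ := PySem.List.getElem_of_index?_eq_some hk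
  have hval : (PySem.List.pyGet? price (k : Int)).getD [] = i := by
    rw [PySem.List.pyGet?_natCast, List.getElem?_eq_getElem hlt, hget]; rfl
  rw [show (fun fp y =>
      if (PySem.List.pyGet? i 0).getD 0 = (PySem.List.pyGet? y 0).getD 0 then
        match PySem.List.index? price i with
        | some index => fp ++ [(PySem.List.pyGet? price (index : Int)).getD []]
        | none => fp
      else fp)
    = (fun fp (y : List Int) => if pvKey i = pvKey y then fp ++ [i] else fp) from ?_]
  · rw [PySem.List.foldl_append_ite (fun y => pvKey i = pvKey y) (fun _ => i)]
    congr 1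
    rw [List.map_const', ← List.countP_eq_length_filter]
    congr 1
    apply List.countP_congr
    intro y _
    rcases eq_or_ne (pvKey i) (pvKey y) with h | h
    · simp [h]
    · simp [h, Ne.symm h]
  · funext fp y
    rw [hk]
    by_cases h : (PySem.List.pyGet? i 0).getD 0 = (PySem.List.pyGet? y 0).getD 0 <;>
      simp [pvKey, h, List.getElem?_eq_getElem hlt, hget]

-- B's counts dictionary is the Counter of the mapped keys.
lemma pv_counts (product_db : List (List Int)) :
    product_db.foldl (fun d y =>
      d.insert ((PySem.List.pyGet? y 0).getD 0) (d.getD ((PySem.List.pyGet? y 0).getD 0) 0 + 1))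
      PySem.Dict.empty
    = PySem.Dict.counter (product_db.map pvKey) := by
  rw [← PySem.Dict.foldl_insert_getD_add_one_eq_counter, List.foldl_map]
  rfl

-- B's looked-up count, as a Nat, is the number of matching product rows.
lemma pv_count_lookup (product_db : List (List Int)) (i : List Int) :
    ((PySem.Dict.counter (product_db.map pvKey)).getD ((PySem.List.pyGet? i 0).getD 0) 0).toNat
    = product_db.countP (fun y => pvKey y == pvKey i) := by
  rw [PySem.Dict.getD_counter]
  rw [List.count_eq_countP, List.countP_map]
  simp only [Int.toNat_natCast]
  rfl

-- ===== VERDICT (by name: the statement is the Claim_ definition above) =====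
theorem request_db_spec : Claim_equal_request_db := by
  intro product_db price _ _
  unfold Spec_request_db request_db request_db_alt
  rw [pv_counts]
  have : ∀ (l : List (List Int)) (acc : List (List Int)), (∀ x ∈ l, x ∈ price) →
      l.foldl (fun finish_price i =>
        product_db.foldl (fun fp y =>
          if (PySem.List.pyGet? i 0).getD 0 = (PySem.List.pyGet? y 0).getD 0 then
            match PySem.List.index? price i with
            | some index => fp ++ [(PySem.List.pyGet? price (index : Int)).getD []]
            | none => fp
          else fp) finish_price) acc
      = l.foldl (fun finish_price i =>
          finish_price ++ PySem.List.pyRepeat [i]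
            ((PySem.Dict.counter (product_db.map pvKey)).getD ((PySem.List.pyGet? i 0).getD 0) 0))
          acc := by
    intro l
    induction l with
    | nil => intro acc _; rfl
    | cons x xs ih =>
      intro acc hsub
      simp only [List.foldl_cons]
      rw [pv_inner product_db price x (hsub x (by simp)) acc,
          PySem.List.pyRepeat_singleton, pv_count_lookup]
      exact ih _ (fun z hz => hsub z (by simp [hz]))
  exact this price [] (fun _ h => h)
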